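-- pv_equiv track=rewrite | github.com/fossgis-routing-server/ansible_openstreetmap.de | filter_plugins/php_filters.py | e_php_single_quote
-- ===== SOURCE A (Python) =====
-- def e_php_single_quote(raw):
--     '''Escape a raw string to be inserted in a PHP string literal surrounded by single quotes.
--
--     See https://www.php.net/manual/en/language.types.string.php for details.
--     '''
--     escaped = ''
--     for char in raw:
--         if char == "'":
--             escaped += '\\\''
--         elif char == '\\':
--             escaped += '\\\\'
--         else:
--             escaped += char
--     return escaped
-- ===== SOURCE B (Python) =====
-- def e_php_single_quote(raw):
--     '''Escape a raw string to be inserted in a PHP string literal surrounded by single quotes.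
--
--     See https://www.php.net/manual/en/language.types.string.php for details.
--     '''
--     # Backslashes must be doubled first so the backslashes added for quotes are not doubled.
--     return raw.replace('\\', '\\\\').replace("'", "\\'")
-- ===== Notes on version B (the rewrite author's own statement) =====
-- stated objective: idiomatic
-- what changed: The branching per-character accumulation loop is replaced by two sequential whole-string str.replace substitutions (backslashes doubled first, then quotes escaped), eliminating the Python-level loop; the C-level scans give a constant-factor speedup.
import Mathlib
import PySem

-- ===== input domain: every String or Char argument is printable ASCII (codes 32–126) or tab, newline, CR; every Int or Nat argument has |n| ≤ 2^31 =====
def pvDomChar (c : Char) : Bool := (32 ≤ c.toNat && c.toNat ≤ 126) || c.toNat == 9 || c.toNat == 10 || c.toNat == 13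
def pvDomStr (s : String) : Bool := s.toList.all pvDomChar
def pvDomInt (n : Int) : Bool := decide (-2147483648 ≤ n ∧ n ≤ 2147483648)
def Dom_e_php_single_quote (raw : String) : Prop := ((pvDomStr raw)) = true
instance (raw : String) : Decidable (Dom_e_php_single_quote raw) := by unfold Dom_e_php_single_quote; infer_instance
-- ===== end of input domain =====

-- B replaces A's branching per-character accumulation loop by two sequential whole-string
-- replace substitutions (backslashes doubled first, then single quotes escaped): idiomatic.


-- ===== PORT A =====
-- literal port of A: character loop with a string accumulator and the same branch order
def e_php_single_quote (raw : String) : String :=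
  raw.toList.foldl
    (fun escaped char =>
      if char = '\'' then escaped ++ "\\'"
      else if char = '\\' then escaped ++ "\\\\"
      else escaped.push char)
    ""

-- ===== PORT B =====
-- literal port of B: raw.replace('\\','\\\\').replace("'","\\'")
def e_php_single_quote_alt (raw : String) : String :=
  PySem.Str.replace (PySem.Str.replace raw "\\" "\\\\") "'" "\\'"

-- ===== PRECONDITION & SPEC =====
def Spec_e_php_single_quote (raw : String) (out : String) : Prop := out = e_php_single_quote_alt raw
instance (raw : String) (out : String) : Decidable (Spec_e_php_single_quote raw out) := by unfold Spec_e_php_single_quote; infer_instance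

-- ===== CLAIM (what is proved, stated in full; the proofs are below) =====
def Claim_equal_e_php_single_quote : Prop := ∀ (raw : String), Dom_e_php_single_quote raw → Spec_e_php_single_quote raw (e_php_single_quote raw)

-- ===== LEMMAS AND PROOFS =====

-- single-character replace is a flatMap
theorem replace_go_single (o : Char) (new : List Char) :
    ∀ (l acc : List Char) (fuel : Nat), l.length ≤ fuel →
    PySem.Chars.replace.go [o] new fuel l acc
      = acc.reverse ++ l.flatMap (fun c => if c = o then new else [c]) := by
  intro l
  induction l with
  | nil =>
      intro acc fuel _
      cases fuel <;> simp [PySem.Chars.replace.go]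
  | cons c t ih =>
      intro acc fuel hf
      cases fuel with
      | zero => simp at hf
      | succ fuel =>
        by_cases hc : c = o
        · subst hc
          have hpre : List.isPrefixOf [c] (c :: t) = true := by
            simp [List.isPrefixOf]
          rw [PySem.Chars.replace.go, if_pos hpre]
          simp only [List.length_cons] at hf
          simp only [List.length_cons, List.length_nil, Nat.zero_add, List.drop_succ_cons,
            List.drop_zero]
          rw [ih (new.reverse ++ acc) fuel (by omega)]
          simp
        · have hpre : List.isPrefixOf [o] (c :: t) = false := by
            simp [List.isPrefixOf]
            exact fun h => hc h.symm
          rw [PySem.Chars.replace.go, if_neg (by simp [hpre])]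
          simp only [List.length_cons] at hf
          rw [ih (c :: acc) fuel (by omega)]
          simp [hc]

theorem replace_single (o : Char) (new l : List Char) :
    PySem.Chars.replace l [o] new = l.flatMap (fun c => if c = o then new else [c]) := by
  rw [PySem.Chars.replace, if_neg (by simp)]
  simpa using replace_go_single o new l [] l.length le_rfl

-- A's loop, read on character lists
theorem portA_toList (raw : String) :
    (e_php_single_quote raw).toList
      = raw.toList.flatMap (fun c =>
          if c = '\'' then ['\\', '\'']
          else if c = '\\' then ['\\', '\\']
          else [c]) := by
  unfold e_php_single_quote
  suffices h : ∀ (l : List Char) (acc : String),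
      (l.foldl (fun escaped char =>
        if char = '\'' then escaped ++ "\\'"
        else if char = '\\' then escaped ++ "\\\\"
        else escaped.push char) acc).toList
      = acc.toList ++ l.flatMap (fun c =>
          if c = '\'' then ['\\', '\'']
          else if c = '\\' then ['\\', '\\']
          else [c]) by
    simpa using h raw.toList ""
  intro l
  induction l with
  | nil => intro acc; simp
  | cons c t ih =>
      intro acc
      by_cases h1 : c = '\''
      · simp [h1, ih]
      · by_cases h2 : c = '\\' <;> simp [h1, h2, ih]

-- ===== VERDICT (by name: the statement is the Claim_ definition above) =====
theorem e_php_single_quote_spec : Claim_equal_e_php_single_quote := by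
  intro raw _
  unfold Spec_e_php_single_quote e_php_single_quote_alt
  apply String.toList_injective
  rw [portA_toList]
  rw [PySem.Str.toList_replace, PySem.Str.toList_replace]
  have h1 : ("\\" : String).toList = ['\\'] := by decide
  have h2 : ("'" : String).toList = ['\''] := by decide
  rw [h1, h2, replace_single, replace_single]
  induction raw.toList with
  | nil => simp
  | cons c t ih =>
    simp only [List.flatMap_cons, List.flatMap_append, ih]
    congr 1
    by_cases hq : c = '\''
    · simp [hq]
    · by_cases hb : c = '\\'
      · simp [hb]
      · simp [hq, hb]
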